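-- pv_equiv track=rewrite | github.com/Cloudy-111/Python_in_CodePtit | Số xen kẽ.py | check
-- ===== SOURCE A (Python) =====
-- def check(n):
--     if len(n) % 2 == 0:
--         return 0
--     if len(n) > 1:
--         if n[0] == n[1]:
--             return 0
--     for i in range(2, len(n), 2):
--         if n[i] != n[i-2]:
--             return 0
--     return 1
-- ===== SOURCE B (Python) =====
-- def check(n):
--     # Single forward pass with a parity-toggle accumulator: every element seen
--     # while the flag says "even position" must equal the FIRST element (carried
--     # as an accumulator), and odd total length is read off the final flag
--     # instead of computing len(n) % 2 up front.  No index arithmetic, no n[i-2].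
--     if not n:
--         return 0
--     a = n[0]
--     rest = n[1:]
--     if rest and rest[0] == a:
--         return 0
--     expect_even = False  # position 1 is odd
--     for x in rest:
--         if expect_even and x != a:
--             return 0
--         expect_even = not expect_even
--     return 0 if expect_even else 1
-- ===== Notes on version B (the rewrite author's own statement) =====
-- stated objective: alternative
-- what changed: A's len(n)%2 guard plus an index loop over range(2,len,2) comparing n[i] with n[i-2] is replaced by one forward pass with a parity-toggle accumulator that compares every even-position element to the first element and reads odd total length off the final flag.
import Mathlib
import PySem

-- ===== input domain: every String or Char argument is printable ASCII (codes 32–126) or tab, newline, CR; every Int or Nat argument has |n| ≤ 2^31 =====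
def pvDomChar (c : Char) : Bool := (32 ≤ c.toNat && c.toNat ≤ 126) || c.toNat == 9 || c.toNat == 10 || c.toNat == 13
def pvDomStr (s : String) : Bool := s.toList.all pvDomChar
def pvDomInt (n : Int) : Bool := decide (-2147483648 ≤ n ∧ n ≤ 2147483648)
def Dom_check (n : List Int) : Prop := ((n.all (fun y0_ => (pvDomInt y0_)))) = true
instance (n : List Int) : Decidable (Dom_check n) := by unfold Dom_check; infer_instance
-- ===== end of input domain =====

-- B replaces A's len%2 guard + index loop (n[i] vs n[i-2]) by one forward pass with a
-- parity-toggle accumulator: even-position elements are compared to the first element,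
-- and odd total length is read off the final flag; same 0/1 result.


-- ===== PORT A =====
-- the 'for i in range(2, len(n), 2)' loop with its early 'return 0'
def checkLoop (n : List Int) : List Int → Int
  | [] => 1
  | i :: rest =>
    if PySem.List.pyGet? n i ≠ PySem.List.pyGet? n (i - 2) then 0
    else checkLoop n rest

def check (n : List Int) : Int :=
  if n.length % 2 = 0 then 0
  else if 1 < n.length ∧ PySem.List.pyGet? n 0 = PySem.List.pyGet? n 1 then 0
  else checkLoop n (PySem.List.pyRange 2 (n.length : Int) 2)

-- ===== PORT B =====
-- the 'for x in rest' pass: e is the expect_even flag, a the first element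
def goB (a : Int) (e : Bool) : List Int → Int
  | [] => if e then 0 else 1
  | x :: t => if e = true ∧ x ≠ a then 0 else goB a (!e) t

def check_alt (n : List Int) : Int :=
  match n with
  | [] => 0
  | a :: rest =>
    -- 'if rest and rest[0] == a: return 0'
    if rest.head? = some a then 0
    else goB a false rest

-- ===== PRECONDITION & SPEC =====
def Spec_check (n : List Int) (out : Int) : Prop := out = check_alt n
instance (n : List Int) (out : Int) : Decidable (Spec_check n out) := by unfold Spec_check; infer_instance

-- ===== CLAIM (what is proved, stated in full; the proofs are below) =====
def Claim_equal_check : Prop := ∀ (n : List Int), Dom_check n → Spec_check n (check n)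

-- ===== LEMMAS AND PROOFS =====

theorem pyGet_nat (xs : List Int) (m : Nat) : PySem.List.pyGet? xs ((m : Nat) : Int) = xs[m]? := by
  simp [pysem]

-- the even-index chain condition both programs decide
def ConstEvens (n : List Int) : Prop := ∀ k : Nat, 2 * k < n.length → n[2 * k]? = n[0]?

theorem checkLoop_eq (n : List Int) (l : List Int) :
    checkLoop n l = if ∀ i ∈ l, PySem.List.pyGet? n i = PySem.List.pyGet? n (i - 2) then 1 else 0 := by
  induction l with
  | nil => simp [checkLoop]
  | cons i rest ih =>
    by_cases h : PySem.List.pyGet? n i = PySem.List.pyGet? n (i - 2)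
    · simp [checkLoop, h, ih]
    · simp [checkLoop, h]

theorem loop_iff_const (n : List Int) :
    (∀ i ∈ PySem.List.pyRange 2 (n.length : Int) 2,
        PySem.List.pyGet? n i = PySem.List.pyGet? n (i - 2)) ↔ ConstEvens n := by
  constructor
  · intro h k hk
    induction k with
    | zero => rfl
    | succ k ih =>
      have hk' : 2 * k < n.length := by omega
      have hi : ((2 * (k + 1) : Nat) : Int) ∈ PySem.List.pyRange 2 (n.length : Int) 2 := by
        rw [PySem.List.mem_pyRange_iff_of_pos (by norm_num)]
        refine ⟨by push_cast; omega, by push_cast; omega, ⟨k, by push_cast; ring⟩⟩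
      have := h _ hi
      have e2 : ((2 * (k + 1) : Nat) : Int) - 2 = ((2 * k : Nat) : Int) := by push_cast; ring
      rw [pyGet_nat, e2, pyGet_nat] at this
      rw [this]
      exact ih hk'
  · intro h i hi
    rw [PySem.List.mem_pyRange_iff_of_pos (by norm_num)] at hi
    obtain ⟨h2, hlt, ⟨q, hq⟩⟩ := hi
    have hq' : i = 2 * q + 2 := by omega
    have hqn : 0 ≤ q := by omega
    obtain ⟨m, rfl⟩ := Int.eq_ofNat_of_zero_le hqn
    have e1 : i = ((2 * (m + 1) : Nat) : Int) := by push_cast; omega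
    have e2 : i - 2 = ((2 * m : Nat) : Int) := by push_cast; omega
    have hm1 : 2 * (m + 1) < n.length := by
      have : i < (n.length : Int) := hlt
      omega
    have hm0 : 2 * m < n.length := by omega
    rw [e2, e1, pyGet_nat, pyGet_nat, h (m + 1) hm1, h m hm0]

-- characterization of B's pass, for both values of the flag
theorem goB_char (a : Int) (xs : List Int) :
    (goB a false xs =
        if xs.length % 2 = 0 ∧ (∀ k < xs.length, 2 * k + 1 < xs.length → xs[2 * k + 1]? = some a)
        then 1 else 0)
    ∧ (goB a true xs =
        if xs.length % 2 = 1 ∧ (∀ k < xs.length, 2 * k < xs.length → xs[2 * k]? = some a)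
        then 1 else 0) := by
  induction xs with
  | nil => simp [goB]
  | cons x t ih =>
    obtain ⟨ihf, iht⟩ := ih
    constructor
    · -- e = false: flag toggles to true, no comparison on x
      have hstep : goB a false (x :: t) = goB a true t := by simp [goB]
      rw [hstep, iht]
      by_cases hm : t.length % 2 = 1 ∧ (∀ k < t.length, 2 * k < t.length → t[2 * k]? = some a)
      · rw [if_pos hm, if_pos ?_]
        refine ⟨by simp; omega, ?_⟩
        intro k hk hk2
        simp only [List.getElem?_cons_succ]
        simp only [List.length_cons] at hk2
        exact hm.2 k (by omega) (by omega)
      · rw [if_neg hm, if_neg ?_]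
        intro ⟨hp, hall⟩
        apply hm
        refine ⟨by simp at hp; omega, ?_⟩
        intro k hk hk2
        have := hall k (by simp; omega) (by simp; omega)
        simpa using this
    · -- e = true: x is compared to a, flag toggles to false
      by_cases hx : x = a
      · have hstep : goB a true (x :: t) = goB a false t := by simp [goB, hx]
        rw [hstep, ihf]
        by_cases hm : t.length % 2 = 0 ∧ (∀ k < t.length, 2 * k + 1 < t.length → t[2 * k + 1]? = some a)
        · rw [if_pos hm, if_pos ?_]
          refine ⟨by simp; omega, ?_⟩
          intro k hk hk2
          cases k with
          | zero => simp [hx]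
          | succ k =>
            have e2 : 2 * (k + 1) = (2 * k + 1) + 1 := by omega
            simp only [e2, List.getElem?_cons_succ]
            simp only [List.length_cons] at hk2
            exact hm.2 k (by omega) (by omega)
        · rw [if_neg hm, if_neg ?_]
          intro ⟨hp, hall⟩
          apply hm
          refine ⟨by simp at hp; omega, ?_⟩
          intro k hk hk2
          have := hall (k + 1) (by simp; omega) (by simp; omega)
          have e2 : 2 * (k + 1) = (2 * k + 1) + 1 := by omega
          simpa [e2] using this
      · have hstep : goB a true (x :: t) = 0 := by simp [goB, hx]
        rw [hstep, if_neg ?_]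
        intro ⟨_, hall⟩
        have := hall 0 (by simp) (by simp)
        simp at this
        exact hx this

-- B's side condition on the tail equals ConstEvens of the whole list
theorem tail_cond_iff_const (a : Int) (t : List Int) :
    (∀ k < t.length, 2 * k + 1 < t.length → t[2 * k + 1]? = some a) ↔ ConstEvens (a :: t) := by
  constructor
  · intro h k hk
    cases k with
    | zero => rfl
    | succ k =>
      have e : 2 * (k + 1) = (2 * (k : Nat) + 1) + 1 := by omega
      simp only [e, List.getElem?_cons_succ, List.getElem?_cons_zero]
      have hk' : 2 * (k + 1) < t.length + 1 := by simpa using hk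
      exact h k (by omega) (by omega)
  · intro h k hk hk2
    have := h (k + 1) (by simp; omega)
    have e : 2 * (k + 1) = (2 * (k : Nat) + 1) + 1 := by omega
    simpa [e] using this

-- the two first-element lookups of the n[0] == n[1] guard, computed
theorem guard_iff (a b : Int) (t' : List Int) :
    (PySem.List.pyGet? (a :: b :: t') 0 = PySem.List.pyGet? (a :: b :: t') 1) ↔ b = a := by
  constructor
  · intro h; simpa [pysem] using h.symm
  · intro h; simp [pysem, h]

-- ===== VERDICT (by name: the statement is the Claim_ definition above) =====
theorem check_spec : Claim_equal_check := by
  intro n _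
  unfold Spec_check check check_alt
  match n with
  | [] => simp
  | a :: t =>
    simp only [List.length_cons]
    rw [(goB_char a t).1]
    by_cases h1 : (t.length + 1) % 2 = 0
    · -- even total length: A rejects by the guard, B's recursion hits the odd-length base case
      rw [if_pos h1]
      by_cases hh : t.head? = some a
      · rw [if_pos hh]
      · rw [if_neg hh, if_neg ?_]
        intro ⟨hp, _⟩
        omega
    · rw [if_neg h1]
      by_cases h2 : 1 < t.length + 1 ∧ PySem.List.pyGet? (a :: t) 0 = PySem.List.pyGet? (a :: t) 1
      · -- n[0] == n[1] guard fires in both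
        rw [if_pos h2]
        match t, h2 with
        | b :: t', ⟨_, heq⟩ =>
          have hb : b = a := (guard_iff a b t').mp heq
          rw [if_pos (by simp [hb])]
      · rw [if_neg h2]
        have hh : ¬ t.head? = some a := by
          intro hcon
          apply h2
          match t, hcon with
          | b :: t', hcon =>
            simp at hcon
            exact ⟨by simp, (guard_iff a b t').mpr hcon⟩
        rw [if_neg hh, checkLoop_eq,
          show ((t.length + 1 : Nat) : Int) = (((a :: t).length : Nat) : Int) from by simp]
        have hlen : (a :: t).length = t.length + 1 := by simp
        by_cases hc : ConstEvens (a :: t)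
        · rw [if_pos ((loop_iff_const (a :: t)).mpr hc),
            if_pos ⟨by omega, (tail_cond_iff_const a t).mpr hc⟩]
        · rw [if_neg (fun h => hc ((loop_iff_const (a :: t)).mp h)),
            if_neg (fun h => hc ((tail_cond_iff_const a t).mp h.2))]
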